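-- pv_equiv track=rewrite | github.com/jamesbryer/ams_repo | python/functions/routePlanner.py | routePlanner
-- ===== SOURCE A (Python) =====
-- def routePlanner(peaksList):
--     route = [peaksList[0]]  # Initialize the route with the first peak
--     while len(peaksList) > 1:
--         # Find the next lowest peak (excluding the first one)
--         nextLowest = min(peaksList[1:])
--         # Find the index of the next lowest peak
--         index = peaksList.index(nextLowest)
--         route.append(nextLowest)  # Add the next lowest peak to the route
--         # Update the peaksList to start from the next lowest peak
--         peaksList = peaksList[index:]
--     return route
-- ===== SOURCE B (Python) =====
-- def routePlanner(peaksList):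
--     # One right-to-left pass: the route is the first peak followed by the
--     # chain of suffix minima (kept on a monotone stack), instead of repeated
--     # min()+index()+slice passes.
--     route = [peaksList[0]]
--     chain = []
--     for v in reversed(peaksList[1:]):
--         if not chain or v <= chain[-1]:
--             chain.append(v)
--     route.extend(reversed(chain))
--     return route
-- ===== Notes on version B (the rewrite author's own statement) =====
-- stated objective: alternative
-- what changed: Replaces the repeated min()+index()+slice passes over shrinking suffixes by a single right-to-left pass that keeps the chain of suffix minima on a monotone stack; Pre_ excludes only inputs where A does not return (empty list raises IndexError; lists with a position whose value equals the minimum of the elements after it make A's while loop spin forever).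
import Mathlib
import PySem

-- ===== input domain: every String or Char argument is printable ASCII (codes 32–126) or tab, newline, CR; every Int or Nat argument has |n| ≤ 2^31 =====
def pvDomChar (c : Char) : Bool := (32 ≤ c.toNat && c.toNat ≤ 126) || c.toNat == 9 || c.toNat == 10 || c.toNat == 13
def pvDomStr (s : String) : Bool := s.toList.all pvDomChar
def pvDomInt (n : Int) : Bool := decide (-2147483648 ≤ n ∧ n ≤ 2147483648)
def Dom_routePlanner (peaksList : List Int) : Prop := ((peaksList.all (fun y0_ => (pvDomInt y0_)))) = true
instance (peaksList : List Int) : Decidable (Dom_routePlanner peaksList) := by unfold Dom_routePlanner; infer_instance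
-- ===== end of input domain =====

-- B replaces A's repeated min()+index()+slice loop over shrinking suffixes by one
-- right-to-left monotone-stack pass over the list (a different, single-pass algorithm).


-- ===== PORT A =====
-- A's while loop, transliterated; when index() returns 0 Python's loop never
-- terminates (such inputs are outside Pre_), so the recursion stops there as a
-- totality guard.
def routePlannerLoop (peaks route : List Int) : List Int :=
  if _h : 1 < peaks.length then
    match PySem.List.min? (peaks.drop 1) (fun y => y) with
    | none => route          -- unreachable: peaks.drop 1 ≠ []
    | some nextLowest =>
      match PySem.List.index? peaks nextLowest with
      | none => route        -- unreachable: nextLowest ∈ peaks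
      | some idx =>
        if _h0 : idx = 0 then route   -- Python diverges here (outside Pre_)
        else routePlannerLoop (peaks.drop idx) (route ++ [nextLowest])
  else route
termination_by peaks.length
decreasing_by
  simp only [List.length_drop]
  omega

def routePlanner (peaksList : List Int) : List Int :=
  match PySem.List.pyGet? peaksList 0 with
  | none => []               -- Python raises IndexError on []; outside Pre_
  | some first => routePlannerLoop peaksList [first]

-- ===== PORT B =====
-- Source B: iterate over reversed(peaksList[1:]) pushing v when the stack is empty
-- or v ≤ its top; the Lean list is the Python stack with its top at the head,
-- so the final route[0] :: reversed(chain) is first :: the list as built.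
def routePlannerChain (peaksList : List Int) : List Int :=
  (peaksList.drop 1).reverse.foldl
    (fun chain v =>
      match chain with
      | [] => [v]
      | m :: _ => if v ≤ m then v :: chain else chain) []

def routePlanner_alt (peaksList : List Int) : List Int :=
  match PySem.List.pyGet? peaksList 0 with
  | none => []
  | some first => first :: routePlannerChain peaksList

-- ===== PRECONDITION & SPEC =====
-- Pre_ excludes exactly the inputs on which A does not return: the empty list
-- (IndexError) and any list having a position whose value equals the minimum of
-- the elements after it (there A's while loop never terminates, because index()
-- finds position 0 and the slice leaves the list unchanged).
def goodB : List Int → Bool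
  | [] => true
  | x :: r => (decide (PySem.List.min? r (fun y => y) ≠ some x)) && goodB r

def Pre_routePlanner (peaksList : List Int) : Prop :=
  peaksList ≠ [] ∧ goodB peaksList = true
instance (peaksList : List Int) : Decidable (Pre_routePlanner peaksList) := by
  unfold Pre_routePlanner; infer_instance

def pvWitness_routePlanner : List Int := [5, 3, 7, 2, 9]

def Spec_routePlanner (peaksList : List Int) (out : List Int) : Prop := out = routePlanner_alt peaksList
instance (peaksList : List Int) (out : List Int) : Decidable (Spec_routePlanner peaksList out) := by unfold Spec_routePlanner; infer_instance

-- ===== CLAIM (what is proved, stated in full; the proofs are below) =====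
def Claim_equal_routePlanner : Prop := ∀ (peaksList : List Int), Dom_routePlanner peaksList → Pre_routePlanner peaksList → Spec_routePlanner peaksList (routePlanner peaksList)

-- ===== LEMMAS AND PROOFS =====

-- Abbreviation for B's fold, used only in the proofs below.
def chainF (l : List Int) : List Int :=
  l.reverse.foldl
    (fun chain v =>
      match chain with
      | [] => [v]
      | m :: _ => if v ≤ m then v :: chain else chain) []

theorem chainF_cons (x : Int) (rest : List Int) :
    chainF (x :: rest) =
      match chainF rest with
      | [] => [x]
      | m :: t => if x ≤ m then x :: m :: t else m :: t := by
  simp only [chainF, List.reverse_cons, List.foldl_append, List.foldl_cons, List.foldl_nil]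
  rcases rest.reverse.foldl _ [] with _ | ⟨m, t⟩ <;> rfl

theorem min?_some (l : List Int) (h : l ≠ []) :
    ∃ m, PySem.List.min? l (fun y => y) = some m := by
  rcases hm : PySem.List.min? l (fun y => y) with _ | m
  · exact absurd ((PySem.List.min?_eq_none_iff l _).mp hm) h
  · exact ⟨m, rfl⟩

theorem min?_eq_of (l : List Int) (a b : Int)
    (h1 : PySem.List.min? l (fun y => y) = some a)
    (h2 : b ∈ l) (h3 : ∀ y ∈ l, b ≤ y) :
    a = b :=
  le_antisymm (PySem.List.min?_isMin h1 b h2) (h3 a (PySem.List.min?_mem h1))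

theorem min?_cons_le (x : Int) (rest : List Int) (m : Int)
    (hm : PySem.List.min? rest (fun y => y) = some m) (hle : x ≤ m) :
    PySem.List.min? (x :: rest) (fun y => y) = some x := by
  obtain ⟨a, ha⟩ := min?_some (x :: rest) (by simp)
  have : a = x := min?_eq_of _ a x ha (by simp) (by
    intro y hy
    rcases List.mem_cons.mp hy with h | h
    · omega
    · exact le_trans hle (PySem.List.min?_isMin hm y h))
  rw [ha, this]

theorem min?_cons_gt (x : Int) (rest : List Int) (m : Int)
    (hm : PySem.List.min? rest (fun y => y) = some m) (hgt : m < x) :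
    PySem.List.min? (x :: rest) (fun y => y) = some m := by
  obtain ⟨a, ha⟩ := min?_some (x :: rest) (by simp)
  have : a = m := min?_eq_of _ a m ha (List.mem_cons_of_mem _ (PySem.List.min?_mem hm)) (by
    intro y hy
    rcases List.mem_cons.mp hy with h | h
    · omega
    · exact PySem.List.min?_isMin hm y h)
  rw [ha, this]

theorem min?_tail_of_ne (y : Int) (r : List Int) (m : Int)
    (hm : PySem.List.min? (y :: r) (fun z => z) = some m) (hne : y ≠ m) :
    PySem.List.min? r (fun z => z) = some m ∧ m < y := by
  have hmem : m ∈ y :: r := PySem.List.min?_mem hm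
  have hmr : m ∈ r := by
    rcases List.mem_cons.mp hmem with h | h
    · exact absurd h.symm hne
    · exact h
  have hry : m ≤ y := PySem.List.min?_isMin hm y (by simp)
  obtain ⟨m', hm'⟩ := min?_some r (List.ne_nil_of_mem hmr)
  have : m' = m := min?_eq_of r m' m hm' hmr (by
    intro z hz; exact PySem.List.min?_isMin hm z (List.mem_cons_of_mem _ hz))
  refine ⟨by rw [hm', this], by omega⟩

-- The head of the chain is Python's min of the list.
theorem chainF_head (l : List Int) (hl : l ≠ []) :
    ∃ m t, chainF l = m :: t ∧ PySem.List.min? l (fun y => y) = some m := by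
  induction l with
  | nil => exact absurd rfl hl
  | cons x rest ih =>
    rw [chainF_cons]
    by_cases hr : rest = []
    · subst hr
      exact ⟨x, [], by simp [chainF], by simpa using PySem.List.min?_id_cons x []⟩
    · obtain ⟨m, t, hc, hm⟩ := ih hr
      rw [hc]
      by_cases hle : x ≤ m
      · exact ⟨x, m :: t, by simp [hle], min?_cons_le x rest m hm hle⟩
      · exact ⟨m, t, by simp [hle], min?_cons_gt x rest m hm (by omega)⟩

-- Peeling the chain: dropping through the leftmost occurrence of the minimum
-- removes exactly the head of the chain.
theorem chainF_peel (l : List Int) : ∀ (m : Int) (p : Nat),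
    PySem.List.min? l (fun y => y) = some m →
    PySem.List.index? l m = some p →
    chainF l = m :: chainF (l.drop (p + 1)) := by
  induction l with
  | nil => intro m p hm; simp [PySem.List.min?] at hm
  | cons y r ih =>
    intro m p hm hp
    by_cases hym : y = m
    · subst hym
      rw [PySem.List.index?_cons_self] at hp
      injection hp with hp; subst hp
      rw [chainF_cons]
      have hdr : List.drop (0 + 1) (y :: r) = r := rfl
      rw [hdr]
      by_cases hr : r = []
      · subst hr; simp [chainF]
      · obtain ⟨m', t', hc, hm'⟩ := chainF_head r hr
        have hle : y ≤ m' :=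
          PySem.List.min?_isMin hm m' (List.mem_cons_of_mem _ (PySem.List.min?_mem hm'))
        rw [hc]; simp [hle, ← hc]
    · obtain ⟨hmr, hlt⟩ := min?_tail_of_ne y r m hm hym
      rw [PySem.List.index?_cons_of_ne r hym] at hp
      rcases hq : PySem.List.index? r m with _ | q
      · rw [hq] at hp; simp at hp
      · rw [hq] at hp
        simp only [Option.map_some, Option.some.injEq] at hp
        subst hp
        have hrec := ih m q hmr hq
        rw [chainF_cons, hrec]
        have hyle : ¬ y ≤ m := by omega
        simp only [hyle, if_false, List.drop_succ_cons]

-- goodB is preserved by drop.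
theorem goodB_drop (l : List Int) : ∀ (k : Nat), goodB l = true → goodB (l.drop k) = true := by
  induction l with
  | nil => intro k _; simp [goodB]
  | cons x r ih =>
    intro k h
    rcases k with _ | k
    · exact h
    · simp only [List.drop_succ_cons]
      simp only [goodB, Bool.and_eq_true] at h
      exact ih k h.2

-- Main invariant: A's loop appends the chain of the tail of the current list.
theorem loop_eq : ∀ (n : Nat) (peaks route : List Int), peaks.length ≤ n →
    peaks ≠ [] → goodB peaks = true →
    routePlannerLoop peaks route = route ++ chainF (peaks.drop 1) := by
  intro n
  induction n with
  | zero =>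
    intro peaks route h hne _
    rcases peaks with _ | ⟨x, tail⟩
    · exact absurd rfl hne
    · simp at h
  | succ n ih =>
    intro peaks route hlen hne hgood
    rcases peaks with _ | ⟨x, tail⟩
    · exact absurd rfl hne
    by_cases htne : tail = []
    · subst htne
      rw [routePlannerLoop]
      simp [chainF]
    obtain ⟨m, t, hc, hm⟩ := chainF_head tail htne
    have hmmem : m ∈ tail := PySem.List.min?_mem hm
    have hxm : x ≠ m := by
      simp only [goodB, Bool.and_eq_true, decide_eq_true_eq] at hgood
      intro h; subst h
      exact hgood.1 hm
    obtain ⟨p, hp⟩ : ∃ p, PySem.List.index? tail m = some p :=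
      Option.isSome_iff_exists.mp ((PySem.List.index?_isSome_iff tail m).mpr hmmem)
    have hplt : p < tail.length := (PySem.List.getElem_of_index?_eq_some hp).fst
    have hlen2 : 1 < (x :: tail).length := by
      rcases tail with _ | _
      · exact absurd rfl htne
      · simp
    rw [routePlannerLoop]
    simp only [hlen2, dif_pos, List.drop_one, List.tail_cons, hm,
      PySem.List.index?_cons_of_ne tail hxm, hp, Option.map_some]
    have hp0 : ¬ (p + 1 = 0) := by omega
    simp only [hp0, reduceDIte]
    have hdne : tail.drop p ≠ [] := by
      intro h; rw [List.drop_eq_nil_iff] at h; omega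
    have hlen3 : ((x :: tail).drop (p + 1)).length ≤ n := by
      simp only [List.drop_succ_cons, List.length_drop]
      simp only [List.length_cons] at hlen
      omega
    have hgd : goodB ((x :: tail).drop (p + 1)) = true := goodB_drop _ (p + 1) hgood
    rw [List.drop_succ_cons] at hlen3 hgd ⊢
    rw [ih (tail.drop p) (route ++ [m]) hlen3 hdne hgd]
    rw [List.drop_drop, chainF_peel tail m p hm hp]
    simp [List.append_assoc]

-- ===== VERDICT (by name: the statement is the Claim_ definition above) =====
theorem routePlanner_spec : Claim_equal_routePlanner := by
  intro peaksList _ hpre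
  obtain ⟨hne, hgood⟩ := hpre
  unfold Spec_routePlanner routePlanner routePlanner_alt
  rcases peaksList with _ | ⟨x, rest⟩
  · exact absurd rfl hne
  simp only [PySem.List.pyGet?_zero_cons]
  rw [loop_eq (x :: rest).length (x :: rest) [x] (le_refl _) hne hgood]
  simp [routePlannerChain, chainF]
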